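-- pv_equiv track=rewrite | github.com/jcraig949jfi/Prometheus | cartography/shared/scripts/v2/derived_functor_search.py | F3_binomial_transform
-- ===== SOURCE A (Python) =====
-- import math
--
-- def F3_binomial_transform(seq):
--     """B(n) = sum_{k=0}^{n} C(n,k) a_k"""
--     n = len(seq)
--     out = []
--     for i in range(n):
--         s = 0
--         for k in range(i + 1):
--             s += math.comb(i, k) * seq[k]
--         out.append(s)
--     return out
-- ===== SOURCE B (Python) =====
-- def F3_binomial_transform(seq):
--     """B(n) = sum_{k=0}^{n} C(n,k) a_k — incremental Pascal's-triangle rows."""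
--     out = []
--     row = [1]
--     for i in range(len(seq)):
--         out.append(sum(c * a for c, a in zip(row, seq)))
--         row = [1] + [row[j] + row[j + 1] for j in range(i)] + [1]
--     return out
-- ===== Notes on version B (the rewrite author's own statement) =====
-- stated objective: faster
-- what changed: Replaces the per-term math.comb calls with a single Pascal's-triangle row maintained incrementally by additions and a dot product against the sequence each step.
import Mathlib
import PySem

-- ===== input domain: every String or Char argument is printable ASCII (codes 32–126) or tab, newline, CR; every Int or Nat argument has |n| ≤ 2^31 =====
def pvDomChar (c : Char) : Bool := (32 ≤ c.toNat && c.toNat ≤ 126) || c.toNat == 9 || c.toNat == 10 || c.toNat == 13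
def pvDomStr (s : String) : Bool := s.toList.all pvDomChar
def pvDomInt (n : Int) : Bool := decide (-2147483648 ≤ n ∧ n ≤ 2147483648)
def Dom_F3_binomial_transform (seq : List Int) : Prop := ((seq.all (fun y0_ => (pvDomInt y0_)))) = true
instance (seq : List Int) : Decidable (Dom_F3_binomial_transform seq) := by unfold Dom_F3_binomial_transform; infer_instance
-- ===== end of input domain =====

-- B replaces A's per-term math.comb calls by an incrementally maintained Pascal's-triangle
-- row (additions only) dotted with the sequence; objective: faster (asymptotic).

-- ===== PORT A =====
-- seq[k] is always in range (0 ≤ k ≤ i < len(seq)), so pyGetD is exact here.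
def F3_binomial_transform (seq : List Int) : List Int :=
  (PySem.List.pyRange 0 (seq.length : Int) 1).foldl
    (fun out i =>
      out ++ [(PySem.List.pyRange 0 (i + 1) 1).foldl
        (fun s k => s + (Nat.choose i.toNat k.toNat : Int) * PySem.List.pyGetD seq k 0) 0])
    []

-- ===== PORT B =====
-- sum(c * a for c, a in zip(row, seq))
def pvDot (row seq : List Int) : Int :=
  ((row.zip seq).map (fun p => p.1 * p.2)).foldl (· + ·) 0

-- [1] + [row[j] + row[j+1] for j in range(i)] + [1]   (indices always in range: len(row) = i+1)
def pvNextRow (row : List Int) (i : Nat) : List Int :=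
  [1] ++ (List.range i).map (fun j => row.getD j 0 + row.getD (j + 1) 0) ++ [1]

def F3_binomial_transform_alt (seq : List Int) : List Int :=
  ((List.range seq.length).foldl
    (fun (st : List Int × List Int) i => (st.1 ++ [pvDot st.2 seq], pvNextRow st.2 i))
    ([], [1])).1

-- ===== PRECONDITION & SPEC =====
def Spec_F3_binomial_transform (seq : List Int) (out : List Int) : Prop := out = F3_binomial_transform_alt seq
instance (seq : List Int) (out : List Int) : Decidable (Spec_F3_binomial_transform seq out) := by unfold Spec_F3_binomial_transform; infer_instance

-- ===== CLAIM (what is proved, stated in full; the proofs are below) =====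
def Claim_equal_F3_binomial_transform : Prop := ∀ (seq : List Int), Dom_F3_binomial_transform seq → Spec_F3_binomial_transform seq (F3_binomial_transform seq)

-- ===== LEMMAS AND PROOFS =====

-- the i-th Pascal row, and the common value of both programs' i-th output
def rowSpec (i : Nat) : List Int := (List.range (i + 1)).map (fun k => (Nat.choose i k : Int))

def tval (seq : List Int) (i : Nat) : Int :=
  ((List.range (i + 1)).map (fun k => (Nat.choose i k : Int) * seq.getD k 0)).sum

lemma getD_rowSpec (i j : Nat) (h : j < i + 1) : (rowSpec i).getD j 0 = (Nat.choose i j : Int) := by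
  simp [rowSpec, List.getD, h]

lemma nextRow_rowSpec (i : Nat) : pvNextRow (rowSpec i) i = rowSpec (i + 1) := by
  have h1 : rowSpec (i + 1)
      = (1 : Int) :: (List.range (i + 1)).map (fun j => (Nat.choose (i + 1) (j + 1) : Int)) := by
    simp [rowSpec, List.range_succ_eq_map, List.map_map, Function.comp]
  have h2 : (List.range (i + 1)).map (fun j => (Nat.choose (i + 1) (j + 1) : Int))
      = (List.range i).map (fun j => (Nat.choose (i + 1) (j + 1) : Int)) ++ [(Nat.choose (i + 1) (i + 1) : Int)] := by
    simp [List.range_succ]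
  have h3 : (List.range i).map (fun j => (rowSpec i).getD j 0 + (rowSpec i).getD (j + 1) 0)
      = (List.range i).map (fun j => (Nat.choose (i + 1) (j + 1) : Int)) := by
    apply List.map_congr_left
    intro j hj
    have hj' : j < i := List.mem_range.mp hj
    rw [getD_rowSpec i j (by omega), getD_rowSpec i (j + 1) (by omega)]
    rw [Nat.choose_succ_succ i j]
    push_cast
    ring
  rw [h1, h2]
  simp only [pvNextRow, h3]
  simp [Nat.choose_self]

lemma zip_map_range (f : Nat → Int) (m : Nat) (seq : List Int) (h : m ≤ seq.length) :
    ((List.range m).map f).zip seq = (List.range m).map (fun k => (f k, seq.getD k 0)) := by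
  apply List.ext_getElem
  · simp [Nat.min_eq_left h]
  · intro j h1 h2
    have hj : j < m := by simpa [Nat.min_eq_left h] using h1
    have hjs : j < seq.length := lt_of_lt_of_le hj h
    simp [List.getElem_zip, List.getD, List.getElem?_eq_getElem hjs]

lemma dot_rowSpec (seq : List Int) (i : Nat) (h : i < seq.length) :
    pvDot (rowSpec i) seq = tval seq i := by
  unfold pvDot rowSpec tval
  rw [zip_map_range _ _ _ (by omega)]
  rw [List.map_map]
  rw [List.sum_eq_foldl]
  rfl

-- A's output is the pointwise map of tval
lemma inner_eq_tval (seq : List Int) (i : Nat) :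
    (PySem.List.pyRange 0 ((i : Int) + 1) 1).foldl
      (fun s k => s + (Nat.choose (i : Int).toNat k.toNat : Int) * PySem.List.pyGetD seq k 0) 0
      = tval seq i := by
  have h : ((i : Int) + 1) = ((i + 1 : Nat) : Int) := by push_cast; ring
  rw [h, PySem.List.pyRange_zero_natCast, List.foldl_map, PySem.List.foldl_add]
  simp [tval]

lemma A_eq_map (seq : List Int) :
    F3_binomial_transform seq = (List.range seq.length).map (tval seq) := by
  unfold F3_binomial_transform
  rw [PySem.List.pyRange_zero_natCast, List.foldl_map, PySem.List.foldl_append_singleton_eq_map]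
  simp only [List.nil_append]
  exact List.map_congr_left (fun i _ => inner_eq_tval seq i)

-- B's loop invariant
lemma B_invariant (seq : List Int) (m : Nat) (hm : m ≤ seq.length) :
    (List.range m).foldl
      (fun (st : List Int × List Int) i => (st.1 ++ [pvDot st.2 seq], pvNextRow st.2 i))
      ([], [1]) = ((List.range m).map (tval seq), rowSpec m) := by
  induction m with
  | zero => simp [rowSpec]
  | succ m ih =>
    rw [List.range_succ, List.foldl_append, ih (by omega)]
    simp only [List.foldl_cons, List.foldl_nil]
    rw [nextRow_rowSpec, dot_rowSpec seq m (by omega)]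
    simp

-- ===== VERDICT (by name: the statement is the Claim_ definition above) =====
theorem F3_binomial_transform_spec : Claim_equal_F3_binomial_transform := by
  intro seq _
  unfold Spec_F3_binomial_transform F3_binomial_transform_alt
  rw [B_invariant seq seq.length le_rfl, A_eq_map]
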